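-- pv_equiv track=rewrite | github.com/kisblilla/interview | firsttask.py | more_tower
-- ===== SOURCE A (Python) =====
-- def more_tower_calculation(n):
--         one_tower_surface = ((n-2)*4+10)
--         return (one_tower_surface)
--
-- def more_tower(towers_heights):
--     connection_surface=0
--     previous=0
--     for i in towers_heights:
--         if i<previous:
--             previous=i
--             connection_surface=connection_surface+i
--         else:
--             connection_surface=connection_surface+previous
--             previous=i
--
--     surface=0
--     for i in towers_heights:
--         surface=surface+more_tower_calculation(i)
--     all_surface=surface-2*connection_surface
--     return all_surface
-- ===== SOURCE B (Python) =====
-- def more_tower(towers_heights):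
--     # Closed form: using min(a,b) = (a+b-|a-b|)/2, the total collapses to
--     # 2*sum + 2*len + last + |first| + sum of absolute adjacent differences.
--     if not towers_heights:
--         return 0
--     total = 2 * sum(towers_heights) + 2 * len(towers_heights)
--     total += towers_heights[-1] + abs(towers_heights[0])
--     for a, b in zip(towers_heights, towers_heights[1:]):
--         total += abs(b - a)
--     return total
-- ===== Notes on version B (the rewrite author's own statement) =====
-- stated objective: alternative
-- what changed: Replaces A's stateful previous/min accumulator loop and per-element surface loop with a closed form derived from min(a,b)=(a+b-|a-b|)/2: total = 2*sum + 2*len + last + |first| + sum of absolute adjacent differences, computed in one pass with no minima.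
import Mathlib
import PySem

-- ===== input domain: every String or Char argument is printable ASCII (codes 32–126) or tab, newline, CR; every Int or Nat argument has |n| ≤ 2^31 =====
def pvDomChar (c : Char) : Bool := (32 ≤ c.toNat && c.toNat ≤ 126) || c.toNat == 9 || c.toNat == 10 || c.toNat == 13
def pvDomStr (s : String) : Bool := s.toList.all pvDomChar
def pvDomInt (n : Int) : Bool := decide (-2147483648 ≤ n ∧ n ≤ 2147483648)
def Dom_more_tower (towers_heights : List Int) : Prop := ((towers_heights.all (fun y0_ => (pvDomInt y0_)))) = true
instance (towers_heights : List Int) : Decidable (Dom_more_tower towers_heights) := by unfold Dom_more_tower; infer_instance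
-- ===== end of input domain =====

-- B: closed form via min(a,b)=(a+b-|a-b|)/2 — total = 2*sum + 2*len + last + |first| + sum of absolute adjacent differences; objective: alternative (no minima, single pass).


-- ===== PORT A =====
def more_tower_calculation (n : Int) : Int := (n - 2) * 4 + 10

def more_tower (towers_heights : List Int) : Int :=
  let cs := towers_heights.foldl
    (fun (s : Int × Int) i =>
      if i < s.2 then (s.1 + i, i) else (s.1 + s.2, i)) (0, 0)
  let surface := towers_heights.foldl
    (fun s i => s + more_tower_calculation i) 0
  surface - 2 * cs.1

-- ===== PORT B =====
def more_tower_alt (towers_heights : List Int) : Int :=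
  match towers_heights with
  | [] => 0
  | h :: t =>
    2 * (h :: t).sum + 2 * ((h :: t).length : Int)
      + (h :: t).getLastD 0 + |h|
      + (((h :: t).zip t).map (fun p => |p.2 - p.1|)).sum

-- ===== PRECONDITION & SPEC =====
def Spec_more_tower (towers_heights : List Int) (out : Int) : Prop := out = more_tower_alt towers_heights
instance (towers_heights : List Int) (out : Int) : Decidable (Spec_more_tower towers_heights out) := by unfold Spec_more_tower; infer_instance

-- ===== CLAIM (what is proved, stated in full; the proofs are below) =====
def Claim_equal_more_tower : Prop := ∀ (towers_heights : List Int), Dom_more_tower towers_heights → Spec_more_tower towers_heights (more_tower towers_heights)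

-- ===== LEMMAS AND PROOFS =====

theorem pv_surface_fold (ths : List Int) (s : Int) :
    ths.foldl (fun s i => s + more_tower_calculation i) s
      = s + 4 * ths.sum + 2 * (ths.length : Int) := by
  induction ths generalizing s with
  | nil => simp
  | cons h t ih =>
      rw [List.foldl_cons, ih]
      simp only [List.sum_cons, List.length_cons, more_tower_calculation]
      push_cast
      ring

-- 2·(connection fold) expressed via absolute adjacent differences: for nonempty ths,
-- 2·conn = prev + 2·sum − last − (|h₀−prev| + Σ|hᵢ−hᵢ₋₁|), from 2·min(a,b) = a+b−|b−a|.
theorem pv_conn_fold (ths : List Int) (c prev : Int) :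
    2 * (ths.foldl (fun (s : Int × Int) i =>
        if i < s.2 then (s.1 + i, i) else (s.1 + s.2, i)) (c, prev)).1
      = 2 * c + (match ths with
        | [] => 0
        | _ :: _ => prev + 2 * ths.sum - ths.getLastD 0
            - (((prev :: ths).zip ths).map (fun p => |p.2 - p.1|)).sum) := by
  induction ths generalizing c prev with
  | nil => simp
  | cons h t ih =>
      have step : (if h < prev then (c + h, h) else (c + prev, h))
          = (c + min prev h, h) := by
        split_ifs with hl <;> simp only [Prod.mk.injEq, and_true] <;> omega
      rw [List.foldl_cons, step, ih]
      cases t with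
      | nil =>
          simp only [List.sum_cons, List.sum_nil, List.getLastD_cons, List.getLastD_nil, List.zip_cons_cons,
            List.zip_nil_right, List.map_cons, List.map_nil, List.sum_cons]
          rcases le_total h prev with hle | hle
          · rw [min_eq_right hle, abs_of_nonpos (by omega : h - prev ≤ 0)]; ring
          · rw [min_eq_left hle, abs_of_nonneg (by omega : 0 ≤ h - prev)]; ring
      | cons h2 t2 =>
          simp only [List.sum_cons, List.zip_cons_cons, List.map_cons, List.sum_cons,
            List.getLastD_cons]
          rcases le_total h prev with hle | hle
          · rw [min_eq_right hle, abs_of_nonpos (by omega : h - prev ≤ 0)]; ring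
          · rw [min_eq_left hle, abs_of_nonneg (by omega : 0 ≤ h - prev)]; ring

-- ===== VERDICT (by name: the statement is the Claim_ definition above) =====
theorem more_tower_spec : Claim_equal_more_tower := by
  intro ths _
  show more_tower ths = more_tower_alt ths
  cases ths with
  | nil => simp [more_tower, more_tower_alt]
  | cons h t =>
      have hc := pv_conn_fold (h :: t) 0 0
      simp only [more_tower, more_tower_alt, pv_surface_fold]
      simp only [List.zip_cons_cons, List.map_cons, List.sum_cons, List.getLastD_cons, sub_zero] at hc ⊢
      omega
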